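-- pv_equiv track=rewrite | github.com/vianneyba/kata-potter | kata-potter.py | livre_groupe
-- ===== SOURCE A (Python) =====
-- def livre_groupe(livres):
--   """renvoie une liste de quantitée de livre"""
--   set_sizes = []
--   while livres:
--     set_livres = set(livres)
--     set_sizes.append(len(set_livres))
--     for livre in set_livres:
--       livres.remove(livre)
--   return set_sizes
-- ===== SOURCE B (Python) =====
-- def livre_groupe(livres):
--     """renvoie une liste de quantitee de livre"""
--     counts = {}
--     for b in livres:
--         counts[b] = counts.get(b, 0) + 1
--     vals = list(counts.values())
--     m = max(vals) if vals else 0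
--     return [sum(1 for c in vals if c >= level) for level in range(1, m + 1)]
-- ===== Notes on version B (the rewrite author's own statement) =====
-- stated objective: faster
-- what changed: Instead of repeatedly building a set of the remaining books and removing one copy of each per round, B builds one frequency dict in a single pass and returns its conjugate partition: for each level from 1 to the maximal frequency, the number of values with frequency >= level; the return value is identical but B does not empty the input list in place as A does.
import Mathlib
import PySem

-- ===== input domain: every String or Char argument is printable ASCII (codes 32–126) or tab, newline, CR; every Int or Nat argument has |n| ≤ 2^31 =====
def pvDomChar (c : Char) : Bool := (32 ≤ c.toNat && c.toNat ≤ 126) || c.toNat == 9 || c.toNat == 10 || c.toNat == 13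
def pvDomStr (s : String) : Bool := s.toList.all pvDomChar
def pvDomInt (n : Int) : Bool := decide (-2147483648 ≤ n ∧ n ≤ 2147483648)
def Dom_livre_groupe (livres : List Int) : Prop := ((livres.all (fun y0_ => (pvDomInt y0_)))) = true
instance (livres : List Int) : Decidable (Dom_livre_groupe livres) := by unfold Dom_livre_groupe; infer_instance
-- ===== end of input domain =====

-- B replaces A's repeated set-building/removal rounds by one frequency dict and its conjugate
-- partition (count of values with frequency >= level). Equivalence is about the RETURN value
-- only: Python A empties its argument list in place, B does not mutate it.

-- ===== PORT A =====
-- inner loop 'for livre in set_livres: livres.remove(livre)': each removal deletes the first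
-- occurrence of a distinct value, so the resulting list does not depend on Python's set
-- iteration order; we iterate in first-occurrence order. 'remove' always succeeds
-- (livre ∈ livres), so getD's default is unreachable.
def livreRound (xs : List Int) : List Int :=
  (PySem.Set.ofList xs).foldl (fun acc v => (PySem.List.remove? acc v).getD acc) xs

-- the 'while livres:' loop; fuel = livres.length suffices since each round removes ≥ 1 element
def livreWhile : Nat → List Int → List Int → List Int
  | _, sizes, [] => sizes
  | 0, sizes, _ => sizes
  | fuel+1, sizes, xs => livreWhile fuel (sizes ++ [((PySem.Set.ofList xs).length : Int)]) (livreRound xs)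

def livre_groupe (livres : List Int) : List Int :=
  livreWhile livres.length [] livres

-- ===== PORT B =====
def livre_groupe_alt (livres : List Int) : List Int :=
  let counts := livres.foldl (fun d x => d.insert x (d.getD x 0 + 1)) PySem.Dict.empty
  let vals := counts.values
  let m : Int := match PySem.List.max? vals (fun c => c) with
    | some v => v
    | none => 0
  (PySem.List.pyRange 1 (m + 1) 1).map (fun level =>
    vals.foldl (fun acc c => if level ≤ c then acc + 1 else acc) (0 : Int))

-- ===== PRECONDITION & SPEC =====
def Spec_livre_groupe (livres : List Int) (out : List Int) : Prop := out = livre_groupe_alt livres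
instance (livres : List Int) (out : List Int) : Decidable (Spec_livre_groupe livres out) := by unfold Spec_livre_groupe; infer_instance

-- ===== CLAIM (what is proved, stated in full; the proofs are below) =====
def Claim_equal_livre_groupe : Prop := ∀ (livres : List Int), Dom_livre_groupe livres → Spec_livre_groupe livres (livre_groupe livres)

-- ===== LEMMAS AND PROOFS =====

-- multiplicities of the distinct values, in first-occurrence order
def valsOf (xs : List Int) : List Int :=
  (PySem.List.dedup xs).map (fun k => (xs.count k : Int))

-- the maximal multiplicity (0 for [])
def mC (xs : List Int) : Int :=
  match valsOf xs with
  | [] => 0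
  | v :: t => t.foldl max v

-- number of distinct values with multiplicity ≥ level
def sC (xs : List Int) (level : Int) : Int :=
  ((PySem.List.dedup xs).countP (fun v => decide (level ≤ (xs.count v : Int))) : Int)

lemma remove_getD_eq_erase (acc : List Int) (v : Int) :
    (PySem.List.remove? acc v).getD acc = acc.erase v := by
  by_cases h : v ∈ acc
  · rw [PySem.List.remove?_eq_some_erase acc v h]; rfl
  · rw [(PySem.List.remove?_eq_none_iff acc v).2 h, Option.getD_none, List.erase_of_not_mem h]

lemma foldl_erase_count (s : List Int) (hs : s.Nodup) (xs : List Int) (v : Int) :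
    (s.foldl List.erase xs).count v = xs.count v - (if v ∈ s then 1 else 0) := by
  induction s generalizing xs with
  | nil => simp
  | cons a t ih =>
    simp only [List.foldl_cons]
    rw [ih (List.nodup_cons.1 hs).2, List.count_erase]
    rcases List.nodup_cons.1 hs with ⟨ha, _⟩
    by_cases hva : v = a
    · subst hva; simp [ha]
    · simp [hva, Ne.symm hva]

lemma livreRound_eq_foldl_erase (xs : List Int) :
    livreRound xs = (PySem.Set.ofList xs).foldl List.erase xs := by
  unfold livreRound
  exact PySem.List.foldl_congr_mem _ _ _ _ (fun acc x _ => remove_getD_eq_erase acc x)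

lemma livreRound_count (xs : List Int) (v : Int) :
    (livreRound xs).count v = xs.count v - 1 := by
  rw [livreRound_eq_foldl_erase, foldl_erase_count _ (PySem.Set.nodup_ofList xs) xs v]
  by_cases h : v ∈ xs
  · simp [PySem.Set.mem_ofList, h]
  · have h0 : xs.count v = 0 := List.count_eq_zero.2 h
    simp [PySem.Set.mem_ofList, h, h0]

lemma mem_livreRound (xs : List Int) (v : Int) :
    v ∈ livreRound xs ↔ 2 ≤ xs.count v := by
  rw [← List.count_pos_iff, livreRound_count]; omega

lemma foldl_erase_length_le (s xs : List Int) :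
    (s.foldl List.erase xs).length ≤ xs.length := by
  induction s generalizing xs with
  | nil => simp
  | cons a t ih =>
    simp only [List.foldl_cons]
    refine le_trans (ih (xs.erase a)) ?_
    rw [List.length_erase]
    split <;> omega

lemma livreRound_length_lt (xs : List Int) (h : xs ≠ []) :
    (livreRound xs).length < xs.length := by
  rw [livreRound_eq_foldl_erase]
  obtain ⟨x, t, rfl⟩ := List.exists_cons_of_ne_nil h
  have hx : x ∈ PySem.Set.ofList (x :: t) := (PySem.Set.mem_ofList _ x).2 (by simp)
  obtain ⟨h0, t0, hs⟩ := List.exists_cons_of_ne_nil (List.ne_nil_of_mem hx)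
  have hh0 : h0 ∈ (x :: t) := by
    have : h0 ∈ PySem.Set.ofList (x :: t) := by rw [hs]; simp
    exact (PySem.Set.mem_ofList _ h0).1 this
  rw [hs]
  simp only [List.foldl_cons]
  refine lt_of_le_of_lt (foldl_erase_length_le t0 _) ?_
  rw [List.length_erase_of_mem hh0]
  simp only [List.length_cons]
  omega

-- countP over two nodup lists agree when the filtered sets agree
lemma countP_nodup_congr (l1 l2 : List Int) (p1 p2 : Int → Bool)
    (h1 : l1.Nodup) (h2 : l2.Nodup)
    (h : ∀ v, (v ∈ l1 ∧ p1 v = true) ↔ (v ∈ l2 ∧ p2 v = true)) :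
    l1.countP p1 = l2.countP p2 := by
  rw [List.countP_eq_length_filter, List.countP_eq_length_filter]
  refine List.Perm.length_eq ?_
  rw [List.perm_ext_iff_of_nodup (h1.filter p1) (h2.filter p2)]
  intro a
  simp only [List.mem_filter]
  exact h a

lemma sC_one (xs : List Int) : sC xs 1 = ((PySem.List.dedup xs).length : Int) := by
  unfold sC
  congr 1
  rw [List.countP_eq_length]
  intro v hv
  have hm : v ∈ xs := (PySem.List.mem_dedup xs v).1 hv
  have h1 : 0 < xs.count v := List.count_pos_iff.2 hm
  simp only [decide_eq_true_eq]
  omega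

lemma sC_shift (xs : List Int) (level : Int) (hl : 1 ≤ level) :
    sC (livreRound xs) level = sC xs (level + 1) := by
  unfold sC
  congr 1
  refine countP_nodup_congr _ _ _ _ (PySem.List.nodup_dedup _) (PySem.List.nodup_dedup _) ?_
  intro v
  rw [PySem.List.mem_dedup, PySem.List.mem_dedup, mem_livreRound, livreRound_count,
    ← List.count_pos_iff (l := xs)]
  simp only [decide_eq_true_eq]
  omega

lemma mem_valsOf (xs : List Int) (v : Int) (h : v ∈ xs) : ((xs.count v : Int)) ∈ valsOf xs := by
  exact List.mem_map.2 ⟨v, (PySem.List.mem_dedup xs v).2 h, rfl⟩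

lemma mC_le (xs : List Int) (v : Int) (h : v ∈ xs) : (xs.count v : Int) ≤ mC xs := by
  have hv := mem_valsOf xs v h
  unfold mC
  cases hvals : valsOf xs with
  | nil => rw [hvals] at hv; simp at hv
  | cons a t =>
    rw [hvals] at hv
    rcases List.mem_cons.1 hv with h' | h'
    · rw [h']; exact (PySem.List.le_foldl_max t a).1
    · exact (PySem.List.le_foldl_max t a).2 _ h'

lemma mC_mem (xs : List Int) (h : xs ≠ []) : ∃ v ∈ xs, (xs.count v : Int) = mC xs := by
  obtain ⟨x, t, rfl⟩ := List.exists_cons_of_ne_nil h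
  have hne : valsOf (x :: t) ≠ [] := by
    intro hc
    have := mem_valsOf (x :: t) x (by simp)
    rw [hc] at this; simp at this
  obtain ⟨a, s, hs⟩ := List.exists_cons_of_ne_nil hne
  have hmc : mC (x :: t) = List.foldl max a s := by
    unfold mC; rw [hs]
  have hmem : mC (x :: t) ∈ valsOf (x :: t) := by
    rw [hmc, hs]
    rcases PySem.List.foldl_max_mem s a with h' | h'
    · rw [h']; simp
    · simp [h']
  obtain ⟨v, hv, hveq⟩ := List.mem_map.1 hmem
  exact ⟨v, (PySem.List.mem_dedup _ v).1 hv, hveq⟩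

lemma mC_pos (xs : List Int) (h : xs ≠ []) : 1 ≤ mC xs := by
  obtain ⟨v, hv, hveq⟩ := mC_mem xs h
  have : 0 < xs.count v := List.count_pos_iff.2 hv
  omega

lemma mC_nil : mC [] = 0 := by rfl

lemma mC_round (xs : List Int) (h : xs ≠ []) : mC (livreRound xs) = mC xs - 1 := by
  by_cases hr : livreRound xs = []
  · -- every multiplicity is 1, so mC xs = 1
    rw [hr, mC_nil]
    obtain ⟨v, hv, hveq⟩ := mC_mem xs h
    have h2 : ¬ (2 ≤ xs.count v) := by
      intro h2
      exact (List.ne_nil_of_mem ((mem_livreRound xs v).2 h2)) hr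
    have h1 : 0 < xs.count v := List.count_pos_iff.2 hv
    omega
  · apply le_antisymm
    · obtain ⟨w, hw, hweq⟩ := mC_mem _ hr
      have hw2 : 2 ≤ xs.count w := (mem_livreRound xs w).1 hw
      have hwmem : w ∈ xs := List.count_pos_iff.1 (by omega)
      have hwle : (xs.count w : Int) ≤ mC xs := mC_le xs w hwmem
      rw [← hweq, livreRound_count]
      omega
    · obtain ⟨v, hv, hveq⟩ := mC_mem xs h
      obtain ⟨u, t, hu⟩ := List.exists_cons_of_ne_nil hr
      have hu2 : 2 ≤ xs.count u := (mem_livreRound xs u).1 (by rw [hu]; simp)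
      have humC : (xs.count u : Int) ≤ mC xs := mC_le xs u (List.count_pos_iff.1 (by omega))
      have hv2 : 2 ≤ xs.count v := by omega
      have hvr : v ∈ livreRound xs := (mem_livreRound xs v).2 hv2
      have := mC_le (livreRound xs) v hvr
      rw [livreRound_count] at this
      omega

-- B's port, re-expressed through valsOf / mC / sC
lemma alt_eq (xs : List Int) :
    livre_groupe_alt xs = (PySem.List.pyRange 1 (mC xs + 1) 1).map (fun level => sC xs level) := by
  have hred : livre_groupe_alt xs =
      (PySem.List.pyRange 1 ((match PySem.List.max? ((PySem.Dict.counter xs).values) (fun c => c) with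
        | some v => v
        | none => (0 : Int)) + 1) 1).map (fun level =>
        ((PySem.Dict.counter xs).values).foldl (fun acc c => if level ≤ c then acc + 1 else acc) (0 : Int)) := rfl
  rw [hred]
  have hvals : (PySem.Dict.counter xs).values = valsOf xs := by
    rw [PySem.Dict.values_eq_map_keys _ (PySem.Dict.nodup_keys_counter xs) 0,
      PySem.Dict.keys_counter]
    unfold valsOf
    rw [PySem.List.dedup_eq_ofList]
    exact List.map_congr_left (fun k _ => PySem.Dict.getD_counter xs k)
  rw [hvals]
  have hm : (match PySem.List.max? (valsOf xs) (fun c => c) with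
      | some v => v
      | none => (0 : Int)) = mC xs := by
    unfold mC
    cases hvals' : valsOf xs with
    | nil => rw [(PySem.List.max?_eq_none_iff _ _).2 rfl]
    | cons a t => rw [PySem.List.max?_id_cons]
  rw [hm]
  refine List.map_congr_left (fun level _ => ?_)
  rw [PySem.List.foldl_ite_add_one (fun c => level ≤ c)]
  unfold valsOf sC
  rw [List.countP_map]
  simp only [Int.zero_add, Function.comp_def]

lemma alt_nil : livre_groupe_alt [] = [] := by decide

lemma alt_cons (xs : List Int) (h : xs ≠ []) :
    livre_groupe_alt xs = ((PySem.Set.ofList xs).length : Int) :: livre_groupe_alt (livreRound xs) := by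
  rw [alt_eq, alt_eq]
  have hm1 : 1 ≤ mC xs := mC_pos xs h
  have hmr : mC (livreRound xs) = mC xs - 1 := mC_round xs h
  rw [PySem.List.pyRange_one_cons (by omega : (1:Int) < mC xs + 1)]
  rw [List.map_cons]
  congr 1
  · rw [sC_one, PySem.List.dedup_eq_ofList]
  · rw [hmr, PySem.List.pyRange_one, PySem.List.pyRange_one]
    have hnum : (mC xs - 1 + 1 - 1).toNat = (mC xs + 1 - (1 + 1)).toNat := by omega
    rw [hnum, List.map_map, List.map_map]
    refine List.map_congr_left (fun k _ => ?_)
    simp only [Function.comp_apply]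
    rw [show (1 + 1 + (k : Int)) = (1 + (k : Int)) + 1 by ring]
    exact (sC_shift xs (1 + (k : Int)) (by omega)).symm

lemma while_eq (fuel : Nat) : ∀ (xs sizes : List Int), xs.length ≤ fuel →
    livreWhile fuel sizes xs = sizes ++ livre_groupe_alt xs := by
  induction fuel with
  | zero =>
    intro xs sizes hlen
    have hnil : xs = [] := List.length_eq_zero_iff.1 (Nat.le_zero.1 hlen)
    subst hnil
    simp [livreWhile, alt_nil]
  | succ f ih =>
    intro xs sizes hlen
    cases xs with
    | nil => simp [livreWhile, alt_nil]
    | cons a t =>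
      rw [show livreWhile (f+1) sizes (a :: t) =
            livreWhile f (sizes ++ [((PySem.Set.ofList (a :: t)).length : Int)]) (livreRound (a :: t)) from rfl]
      have hlt : (livreRound (a :: t)).length < (a :: t).length :=
        livreRound_length_lt (a :: t) (by simp)
      rw [ih _ _ (by simp only [List.length_cons] at hlt hlen; omega)]
      rw [alt_cons (a :: t) (by simp), List.append_assoc]
      rfl

-- ===== VERDICT (by name: the statement is the Claim_ definition above) =====
theorem livre_groupe_spec : Claim_equal_livre_groupe := by
  intro livres _
  unfold Spec_livre_groupe livre_groupe
  rw [while_eq livres.length livres [] le_rfl, List.nil_append]
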